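-- pv_equiv track=rewrite | github.com/Sullofect/qso_cgm | core/OnlineAssessment.py | count_fancy_via_predecessor
-- ===== SOURCE A (Python) =====
-- def count_fancy_via_predecessor(n: int) -> int:
--     if n <= 1:
--         return 0
--
--     # 四进制展开（最高位在前）
--     s = []
--     x = n
--     while x:
--         s.append(x % 4)
--         x //= 4
--     s.reverse()
--
--     t = s[:]  # 将要改造成 m 的四进制 0/1 串
--
--     # 找第一处 >=2
--     first_ge2 = next((i for i, d in enumerate(s) if d >= 2), None)
--     if first_ge2 is not None:
--         i = first_ge2
--         # 前缀保持（必为 0/1），当前位置置 1，后缀全置 1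
--         t[i] = 1
--         for j in range(i + 1, len(t)):
--             t[j] = 1
--     else:
--         # n 的四进制本身只有 0/1，需要取严格更小的最大 0/1 串
--         # 找最右侧的 1
--         r = None
--         for i in range(len(t) - 1, -1, -1):
--             if t[i] == 1:
--                 r = i
--                 break
--         if r is None:
--             return 0  # 理论上只有 n==0 会到这，但前面已排除
--         t[r] = 0
--         for j in range(r + 1, len(t)):
--             t[j] = 1
--         # 去掉可能出现的前导 0
--         while t and t[0] == 0:
--             t.pop(0)
--
--     # 现在 t 是 m 的四进制 0/1 串；把它当作二进制解析就是计数
--     ans = 0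
--     for d in t:
--         ans = (ans << 1) | d
--     return ans
-- ===== SOURCE B (Python) =====
-- def count_fancy_via_predecessor(n: int) -> int:
--     if n <= 1:
--         return 0
--     # base-4 digits of n, most significant first
--     digits = []
--     x = n
--     while x > 0:
--         digits.append(x % 4)
--         x //= 4
--     digits.reverse()
--     # digit DP: count base-4 strings of 0/1 digits strictly below n, including 0
--     count = 0
--     rem = len(digits)
--     for d in digits:
--         rem -= 1
--         for c in (0, 1):
--             if c < d:
--                 count += 2 ** rem
--         if d > 1:
--             break
--     # exclude x = 0
--     return count - 1
-- ===== Notes on version B (the rewrite author's own statement) =====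
-- stated objective: alternative
-- what changed: Replaces A's construction of the base-4 0/1 predecessor string (find first digit >=2 or rightmost 1, rewrite the suffix, strip zeros, reparse as binary) by a single digit-DP pass over the base-4 digits that directly counts the 0/1 strings strictly below n and subtracts 1 for x=0.
import Mathlib
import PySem

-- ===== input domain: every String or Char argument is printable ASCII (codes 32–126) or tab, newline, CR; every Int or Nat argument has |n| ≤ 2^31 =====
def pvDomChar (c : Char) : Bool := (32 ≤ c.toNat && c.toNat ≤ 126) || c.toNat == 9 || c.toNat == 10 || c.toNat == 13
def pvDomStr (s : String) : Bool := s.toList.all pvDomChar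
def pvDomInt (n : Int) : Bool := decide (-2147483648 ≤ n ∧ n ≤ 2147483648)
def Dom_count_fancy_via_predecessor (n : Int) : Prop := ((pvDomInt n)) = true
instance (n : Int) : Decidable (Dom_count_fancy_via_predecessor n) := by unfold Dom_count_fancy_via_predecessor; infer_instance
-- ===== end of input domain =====

-- B replaces A's explicit predecessor-string construction by a one-pass digit DP
-- over the base-4 digits; same cost, genuinely different algorithm (objective: alternative).

-- ===== PORT A =====

-- `while x: s.append(x % 4); x //= 4` — guarded by `0 < x`: the loop is only ever
-- entered with x = n ≥ 2 (n ≤ 1 returned early), where `x != 0` ↔ `0 < x`.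
def pyDigits4 (x : Int) (s : List Int) : List Int :=
  if h : 0 < x then pyDigits4 (PySem.Int.floordiv x 4) (s ++ [PySem.Int.mod x 4]) else s
termination_by x.toNat
decreasing_by
  have h4 : PySem.Int.floordiv x 4 = x / 4 := PySem.Int.floordiv_eq_ediv_of_pos (by omega)
  rw [h4]; omega

-- `for j in range(j0, len(t)): t[j] = 1`
def setOnesFrom (t : List Int) (j : Nat) : List Int :=
  if h : j < t.length then setOnesFrom (t.set j 1) (j + 1) else t
termination_by t.length - j
decreasing_by simp only [List.length_set]; omega

-- `for i in range(len(t)-1, -1, -1): if t[i] == 1: r = i; break` (called with k = len t)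
def findLastOneAux (t : List Int) : Nat → Option Nat
  | 0 => none
  | k + 1 => if t.getD k 0 = 1 then some k else findLastOneAux t k

-- `while t and t[0] == 0: t.pop(0)`
def stripZeros : List Int → List Int
  | [] => []
  | d :: rest => if d = 0 then stripZeros rest else d :: rest

-- `ans = (ans << 1) | d` — every d in t is 0 or 1 and ans stays ≥ 0, so `(ans<<1)|d = 2*ans+d` exactly
def binFold (t : List Int) : Int := t.foldl (fun ans d => 2 * ans + d) 0

def count_fancy_via_predecessor (n : Int) : Int :=
  if n ≤ 1 then 0
  else
    let s := (pyDigits4 n []).reverse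
    let t := s
    match s.findIdx? (fun d => decide (2 ≤ d)) with
    | some i =>
        -- t[i] = 1; suffix all 1
        let t := t.set i 1
        let t := setOnesFrom t (i + 1)
        binFold t
    | none =>
        match findLastOneAux t t.length with
        | none => 0
        | some r =>
            let t := t.set r 0
            let t := setOnesFrom t (r + 1)
            let t := stripZeros t
            binFold t

-- ===== PORT B =====

def altDigits4 (x : Int) (s : List Int) : List Int :=
  if h : 0 < x then altDigits4 (PySem.Int.floordiv x 4) (s ++ [PySem.Int.mod x 4]) else s
termination_by x.toNat
decreasing_by
  have h4 : PySem.Int.floordiv x 4 = x / 4 := PySem.Int.floordiv_eq_ediv_of_pos (by omega)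
  rw [h4]; omega

-- the `for d in digits` loop with its break; rem = number of remaining digits
def altLoop : List Int → Int
  | [] => 0
  | d :: rest =>
      let rem := rest.length
      let add := (if (0:Int) < d then (2:Int) ^ rem else 0) + (if (1:Int) < d then (2:Int) ^ rem else 0)
      if 1 < d then add else add + altLoop rest

def count_fancy_via_predecessor_alt (n : Int) : Int :=
  if n ≤ 1 then 0
  else altLoop ((altDigits4 n []).reverse) - 1

-- ===== PRECONDITION & SPEC =====
def Spec_count_fancy_via_predecessor (n : Int) (out : Int) : Prop := out = count_fancy_via_predecessor_alt n
instance (n : Int) (out : Int) : Decidable (Spec_count_fancy_via_predecessor n out) := by unfold Spec_count_fancy_via_predecessor; infer_instance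

-- ===== CLAIM (what is proved, stated in full; the proofs are below) =====
def Claim_equal_count_fancy_via_predecessor : Prop := ∀ (n : Int), Dom_count_fancy_via_predecessor n → Spec_count_fancy_via_predecessor n (count_fancy_via_predecessor n)

-- ===== LEMMAS AND PROOFS =====

theorem altDigits4_eq_pyDigits4 (x : Int) (s : List Int) : altDigits4 x s = pyDigits4 x s := by
  fun_induction altDigits4 x s with
  | case1 x s h ih => rw [pyDigits4, dif_pos h]; exact ih
  | case2 x s h => rw [pyDigits4, dif_neg h]

theorem pyDigits4_acc (x : Int) (s : List Int) : pyDigits4 x s = s ++ pyDigits4 x [] := by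
  by_cases h : 0 < x
  · rw [pyDigits4, dif_pos h, pyDigits4_acc (PySem.Int.floordiv x 4) (s ++ [PySem.Int.mod x 4])]
    conv_rhs => rw [pyDigits4, dif_pos h,
      pyDigits4_acc (PySem.Int.floordiv x 4) ([] ++ [PySem.Int.mod x 4])]
    simp
  · rw [pyDigits4, dif_neg h, pyDigits4, dif_neg h]; simp
termination_by x.toNat
decreasing_by
  all_goals
    have h4 : PySem.Int.floordiv x 4 = x / 4 := PySem.Int.floordiv_eq_ediv_of_pos (by omega)
    rw [h4]; omega

theorem pyDigits4_cons (x : Int) (h : 0 < x) :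
    pyDigits4 x [] = PySem.Int.mod x 4 :: pyDigits4 (PySem.Int.floordiv x 4) [] := by
  rw [pyDigits4, dif_pos h, pyDigits4_acc]; simp

theorem pyDigits4_mem (x : Int) : ∀ d ∈ pyDigits4 x [], 0 ≤ d ∧ d < 4 := by
  by_cases h : 0 < x
  · rw [pyDigits4_cons x h]
    intro d hd
    rcases List.mem_cons.1 hd with rfl | hd
    · exact ⟨PySem.Int.mod_nonneg _ (by omega), PySem.Int.mod_lt _ (by omega)⟩
    · exact pyDigits4_mem (PySem.Int.floordiv x 4) d hd
  · rw [pyDigits4, dif_neg h]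
    intro d hd; simp at hd
termination_by x.toNat
decreasing_by
  have h4 : PySem.Int.floordiv x 4 = x / 4 := PySem.Int.floordiv_eq_ediv_of_pos (by omega)
  rw [h4]; omega

theorem pyDigits4_last_pos (x : Int) (h : 0 < x) :
    ∃ p l, pyDigits4 x [] = p ++ [l] ∧ 1 ≤ l := by
  rw [pyDigits4_cons x h]
  by_cases h4 : 0 < PySem.Int.floordiv x 4
  · obtain ⟨p, l, hpl, hl⟩ := pyDigits4_last_pos (PySem.Int.floordiv x 4) h4
    exact ⟨PySem.Int.mod x 4 :: p, l, by rw [hpl, List.cons_append], hl⟩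
  · refine ⟨[], PySem.Int.mod x 4, ?_, ?_⟩
    · rw [pyDigits4, dif_neg h4]; rfl
    · have h1 := PySem.Int.floordiv_mul_add_mod x 4
      have h2 := PySem.Int.mod_nonneg x (show (0:Int) < 4 by omega)
      omega
termination_by x.toNat
decreasing_by
  have h4 : PySem.Int.floordiv x 4 = x / 4 := PySem.Int.floordiv_eq_ediv_of_pos (by omega)
  rw [h4]; omega

theorem binFold_foldl (t : List Int) (a : Int) :
    t.foldl (fun ans d => 2 * ans + d) a = a * 2 ^ t.length + binFold t := by
  induction t generalizing a with
  | nil => simp [binFold]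
  | cons d rest ih =>
      show List.foldl _ (2 * a + d) rest = _
      rw [ih (2 * a + d)]
      have : binFold (d :: rest) = (2 * 0 + d) * 2 ^ rest.length + binFold rest := by
        show List.foldl _ (2 * 0 + d) rest = _
        rw [ih (2 * 0 + d)]
      rw [this]
      simp [List.length_cons, pow_succ]
      ring

theorem binFold_cons (d : Int) (t : List Int) : binFold (d :: t) = d * 2 ^ t.length + binFold t := by
  show List.foldl _ (2 * 0 + d) t = _
  rw [binFold_foldl]; ring

theorem binFold_append (p q : List Int) : binFold (p ++ q) = binFold p * 2 ^ q.length + binFold q := by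
  unfold binFold
  rw [List.foldl_append, binFold_foldl]
  rfl

theorem binFold_replicate_one (k : Nat) : binFold (List.replicate k 1) = 2 ^ k - 1 := by
  induction k with
  | zero => simp [binFold]
  | succ m ih =>
      rw [List.replicate_succ, binFold_cons, List.length_replicate, ih, pow_succ]
      ring

theorem binFold_zero_of_all_zero (t : List Int) (h : ∀ d ∈ t, d = 0) : binFold t = 0 := by
  induction t with
  | nil => simp [binFold]
  | cons d rest ih =>
      rw [binFold_cons, h d (List.mem_cons_self), ih (fun d hd => h d (List.mem_cons_of_mem _ hd))]
      ring

theorem stripZeros_binFold (t : List Int) : binFold (stripZeros t) = binFold t := by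
  induction t with
  | nil => rfl
  | cons d rest ih =>
      by_cases h0 : d = 0
      · rw [stripZeros, if_pos h0, ih, h0, binFold_cons]; ring
      · rw [stripZeros, if_neg h0]

theorem take_set_succ (t : List Int) (j : Nat) (a : Int) (h : j < t.length) :
    (t.set j a).take (j + 1) = t.take j ++ [a] := by
  rw [List.set_eq_take_append_cons_drop, if_pos h, List.take_append]
  have h1 : (t.take j).length = j := by simp; omega
  rw [h1]
  simp

theorem setOnesFrom_eq (t : List Int) (j : Nat) :
    setOnesFrom t j = t.take j ++ List.replicate (t.length - j) 1 := by
  fun_induction setOnesFrom t j with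
  | case1 t j h ih =>
      rw [ih, List.length_set, take_set_succ t j 1 h]
      have h1 : t.length - j = (t.length - (j + 1)) + 1 := by omega
      rw [h1, List.replicate_succ]
      simp
  | case2 t j h =>
      have h1 : t.length - j = 0 := by omega
      rw [h1, List.replicate_zero, List.take_of_length_le (by omega)]
      simp

theorem findLastOneAux_some (t : List Int) (k : Nat) (r : Nat)
    (h : findLastOneAux t k = some r) :
    r < k ∧ t.getD r 0 = 1 ∧ ∀ j, r < j → j < k → t.getD j 0 ≠ 1 := by
  induction k with
  | zero => simp [findLastOneAux] at h
  | succ m ih =>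
      rw [findLastOneAux] at h
      by_cases h1 : t.getD m 0 = 1
      · rw [if_pos h1] at h
        injection h with h2
        exact ⟨by omega, by rw [← h2]; exact h1, fun j hj1 hj2 => absurd hj1 (by omega)⟩
      · rw [if_neg h1] at h
        obtain ⟨hr, hg, hmax⟩ := ih h
        refine ⟨by omega, hg, fun j hj1 hj2 => ?_⟩
        by_cases hj : j = m
        · rw [hj]; exact h1
        · exact hmax j hj1 (by omega)

theorem findLastOneAux_ne_none (t : List Int) (k : Nat) (j : Nat) (hj : j < k)
    (h1 : t.getD j 0 = 1) : findLastOneAux t k ≠ none := by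
  induction k with
  | zero => omega
  | succ m ih =>
      rw [findLastOneAux]
      by_cases hm : t.getD m 0 = 1
      · rw [if_pos hm]; simp
      · rw [if_neg hm]
        have hjm : j < m := by
          rcases Nat.lt_succ_iff_lt_or_eq.1 hj with h | h
          · exact h
          · exact absurd (h ▸ h1) hm
        exact ih hjm

theorem altLoop_all01 (s : List Int) (h : ∀ d ∈ s, d = 0 ∨ d = 1) :
    altLoop s = binFold s := by
  induction s with
  | nil => rfl
  | cons d rest ih =>
      rw [altLoop, binFold_cons, ih (fun x hx => h x (List.mem_cons_of_mem _ hx))]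
      rcases h d (List.mem_cons_self) with rfl | rfl <;> norm_num

theorem altLoop_findIdx (s : List Int) (i : Nat)
    (hb : ∀ d ∈ s, 0 ≤ d)
    (h : s.findIdx? (fun d => decide (2 ≤ d)) = some i) :
    altLoop s = binFold (s.take i) * 2 ^ (s.length - i) + 2 ^ (s.length - i) := by
  induction s generalizing i with
  | nil => simp at h
  | cons d rest ih =>
      rw [List.findIdx?_cons] at h
      by_cases hd : 2 ≤ d
      · rw [if_pos (by simpa using hd)] at h
        cases h
        rw [altLoop]
        simp only [List.take_zero, List.length_cons, Nat.sub_zero]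
        rw [if_pos (by omega : (1:Int) < d), if_pos (by omega : (0:Int) < d), if_pos (by omega : (1:Int) < d)]
        show (2:Int) ^ rest.length + 2 ^ rest.length = binFold [] * _ + 2 ^ (rest.length + 1)
        rw [pow_succ]
        simp [binFold]
        ring
      · rw [if_neg (by simpa using hd)] at h
        obtain ⟨j, hj, rfl⟩ := Option.map_eq_some_iff.1 h
        have hjlen : j < rest.length := by
          simp [List.findIdx?_eq_some_iff_findIdx_eq] at hj; omega
        have hd0 : 0 ≤ d := hb d (List.mem_cons_self)
        rw [altLoop, if_neg (by omega : ¬ (1:Int) < d),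
          ih j (fun x hx => hb x (List.mem_cons_of_mem _ hx)) hj]
        rw [List.take_succ_cons, binFold_cons, List.length_take, Nat.min_eq_left (by omega)]
        have hlen : (d :: rest).length - (j + 1) = rest.length - j := by simp
        rw [hlen]
        rw [if_neg (by omega : ¬ (1:Int) < d)]
        by_cases h0 : (0:Int) < d
        · rw [if_pos h0]
          have hd1 : d = 1 := by omega
          subst hd1
          have hp : (2:Int) ^ rest.length = 2 ^ j * 2 ^ (rest.length - j) := by
            rw [← pow_add]; congr 1; omega
          rw [hp]; ring
        · rw [if_neg h0]
          have hd1 : d = 0 := by omega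
          subst hd1
          ring

-- ===== VERDICT (by name: the statement is the Claim_ definition above) =====
theorem count_fancy_via_predecessor_spec : Claim_equal_count_fancy_via_predecessor := by
  intro n _
  unfold Spec_count_fancy_via_predecessor count_fancy_via_predecessor count_fancy_via_predecessor_alt
  by_cases hn : n ≤ 1
  · rw [if_pos hn, if_pos hn]
  · rw [if_neg hn, if_neg hn, altDigits4_eq_pyDigits4]
    simp only []
    set s : List Int := (pyDigits4 n []).reverse with hs
    have hbounds : ∀ d ∈ s, 0 ≤ d ∧ d < 4 := fun d hd => pyDigits4_mem n d (List.mem_reverse.1 hd)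
    have hpos : 0 < n := by omega
    obtain ⟨p, l, hpl, hl⟩ := pyDigits4_last_pos n hpos
    have hshead : s = l :: p.reverse := by rw [hs, hpl]; simp
    cases hidx : s.findIdx? (fun d => decide (2 ≤ d)) with
    | some i =>
        have hiL : i < s.length := by
          simp [List.findIdx?_eq_some_iff_findIdx_eq] at hidx; omega
        have hk : s.length - i = (s.length - i - 1) + 1 := by omega
        set k := s.length - i - 1 with hkdef
        show binFold (setOnesFrom (s.set i 1) (i + 1)) = altLoop s - 1
        rw [setOnesFrom_eq, List.length_set, take_set_succ s i 1 hiL,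
          altLoop_findIdx s i (fun d hd => (hbounds d hd).1) hidx,
          binFold_append, binFold_append, binFold_replicate_one, List.length_replicate]
        have h1 : binFold [(1:Int)] = 1 := by rw [show [(1:Int)] = 1 :: ([]:List Int) from rfl, binFold_cons]; simp [binFold]
        rw [h1]
        have hlen1 : s.length - (i + 1) = k := by omega
        rw [hlen1, hk]
        simp only [List.length_cons, List.length_nil, pow_succ, pow_zero]
        ring
    | none =>
        have h01 : ∀ d ∈ s, d = 0 ∨ d = 1 := by
          intro d hd
          have h2 := List.findIdx?_eq_none_iff.1 hidx d hd
          have h3 := hbounds d hd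
          simp at h2
          omega
        have hl1 : l = 1 := by
          have := h01 l (by rw [hshead]; exact List.mem_cons_self)
          omega
        have hgetD0 : s.getD 0 0 = 1 := by rw [hshead, hl1]; rfl
        have hLpos : 0 < s.length := by rw [hshead]; simp
        cases hfind : findLastOneAux s s.length with
        | none => exact absurd hfind (findLastOneAux_ne_none s s.length 0 hLpos hgetD0)
        | some r =>
            obtain ⟨hrL, hr1, hmax⟩ := findLastOneAux_some s s.length r hfind
            have hsr : s[r]'hrL = 1 := by rw [← List.getD_eq_getElem s 0 hrL]; exact hr1
            have hdropzero : ∀ d ∈ s.drop (r + 1), d = 0 := by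
              intro d hd
              obtain ⟨m, hm, hdm⟩ := List.mem_iff_getElem.1 hd
              have hmlen : r + 1 + m < s.length := by
                have hdl : (s.drop (r + 1)).length = s.length - (r + 1) := List.length_drop
                omega
              have hgd : (s.drop (r + 1))[m] = s[r + 1 + m]'hmlen := by
                rw [List.getElem_drop]
              have hne1 : s.getD (r + 1 + m) 0 ≠ 1 := hmax _ (by omega) hmlen
              rw [List.getD_eq_getElem s 0 hmlen] at hne1
              have hmem : s[r + 1 + m]'hmlen ∈ s := List.getElem_mem _
              rcases h01 _ hmem with h0 | h0
              · rw [← hdm, hgd, h0]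
              · exact absurd h0 hne1
            -- value of s as a binary string, split at position r
            have hsplit : s = s.take r ++ 1 :: s.drop (r + 1) := by
              conv_lhs => rw [← List.take_append_drop r s]
              rw [List.drop_eq_getElem_cons hrL, hsr]
            have hdlen : (s.drop (r + 1)).length = s.length - (r + 1) := List.length_drop
            have hBs : binFold s = binFold (s.take r) * 2 ^ (s.length - r) + 2 ^ (s.length - r - 1) := by
              conv_lhs => rw [hsplit]
              rw [binFold_append, binFold_cons, binFold_zero_of_all_zero _ hdropzero,
                List.length_cons, hdlen]
              have h2 : s.length - (r + 1) + 1 = s.length - r := by omega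
              have h3 : s.length - (r + 1) = s.length - r - 1 := by omega
              rw [h2, h3]
              ring
            show binFold (stripZeros (setOnesFrom (s.set r 0) (r + 1))) = altLoop s - 1
            rw [stripZeros_binFold, setOnesFrom_eq, List.length_set, take_set_succ s r 0 hrL,
              altLoop_all01 s h01, hBs,
              binFold_append, binFold_append, binFold_replicate_one, List.length_replicate]
            have h0 : binFold [(0:Int)] = 0 := by rw [show [(0:Int)] = 0 :: ([]:List Int) from rfl, binFold_cons]; simp [binFold]
            rw [h0]
            have hk : s.length - r = (s.length - (r + 1)) + 1 := by omega
            rw [hk]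
            simp only [List.length_cons, List.length_nil, pow_succ, Nat.add_sub_cancel, pow_zero]
            ring
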